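-- pv_equiv track=rewrite | github.com/furkanozm/ocr-uploader | backend/main.py | validate_tckn
-- ===== SOURCE A (Python) =====
-- def validate_tckn(tckn):
--     if not tckn or not tckn.isdigit() or len(tckn) != 11 or tckn[0] == '0':
--         return False
--     digits = [int(d) for d in tckn]
--     if digits[10] != ((sum(digits[:10]) % 10)):
--         return False
--     if digits[9] != (((sum(digits[0:9:2]) * 7) - sum(digits[1:8:2])) % 10):
--         return False
--     return True
-- ===== SOURCE B (Python) =====
-- def validate_tckn(tckn):
--     if not tckn or not tckn.isdigit() or len(tckn) != 11 or tckn[0] == '0':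
--         return False
--     total = even = odd = 0
--     for i, ch in enumerate(tckn):
--         d = int(ch)
--         if i < 10:
--             total += d
--         if i % 2 == 0 and i <= 8:
--             even += d
--         elif i <= 7:
--             odd += d
--     return int(tckn[10]) == total % 10 and int(tckn[9]) == (even * 7 - odd) % 10
-- ===== Notes on version B (the rewrite author's own statement) =====
-- stated objective: alternative
-- what changed: Replaces the digits-list build plus three slice-based sum() passes with a single enumerate loop that accumulates total, even-position and odd-position sums in one pass before the two checksum comparisons.
import Mathlib
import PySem

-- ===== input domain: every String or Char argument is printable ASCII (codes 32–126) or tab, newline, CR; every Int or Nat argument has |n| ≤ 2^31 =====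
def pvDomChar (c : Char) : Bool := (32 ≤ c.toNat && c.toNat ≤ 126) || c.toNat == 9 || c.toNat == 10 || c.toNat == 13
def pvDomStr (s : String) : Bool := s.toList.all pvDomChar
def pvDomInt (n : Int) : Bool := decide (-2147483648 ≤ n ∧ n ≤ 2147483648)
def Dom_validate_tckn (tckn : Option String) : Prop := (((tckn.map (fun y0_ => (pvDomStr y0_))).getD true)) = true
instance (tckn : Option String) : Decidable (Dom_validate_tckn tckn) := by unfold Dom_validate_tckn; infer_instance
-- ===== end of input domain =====

-- B replaces the digits-list build + three slice sums by a single enumerate pass with three accumulators (objective: alternative decomposition).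

-- int(c) for a single digit character; exact under the preceding isdigit guard.
def pyDigitInt (c : Char) : Int := (c.toNat : Int) - 48

-- ===== PORT A =====
def validate_tckn (tckn : Option String) : Bool :=
  match tckn with
  | none => false
  | some s =>
    -- 'not tckn' on a string is emptiness; guard order as in Python
    if s.toList = [] || !(PySem.Str.strIsdigit s) || PySem.Str.len s ≠ 11 || PySem.Str.pyGet? s 0 == some '0'
    then false
    else
      let digits : List Int := s.toList.map pyDigitInt
      -- digits[10] / digits[9] are in range by the length-11 guard, so pyGetD is exact
      if PySem.List.pyGetD digits 10 0 ≠ PySem.Int.mod (PySem.List.slice digits none (some 10)).sum 10 then false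
      else if PySem.List.pyGetD digits 9 0 ≠ PySem.Int.mod (((PySem.List.slice? digits (some 0) (some 9) 2).getD []).sum * 7 - ((PySem.List.slice? digits (some 1) (some 8) 2).getD []).sum) 10 then false
      else true

-- ===== PORT B =====
def validate_tckn_alt (tckn : Option String) : Bool :=
  match tckn with
  | none => false
  | some s =>
    if s.toList = [] || !(PySem.Str.strIsdigit s) || PySem.Str.len s ≠ 11 || PySem.Str.pyGet? s 0 == some '0'
    then false
    else
      let acc : Int × Int × Int :=
        (PySem.List.enumerate s.toList 0).foldl (fun a p =>
          let d := pyDigitInt p.2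
          let t := if p.1 < 10 then a.1 + d else a.1
          if PySem.Int.mod p.1 2 == 0 && p.1 ≤ 8 then (t, a.2.1 + d, a.2.2)
          else if p.1 ≤ 7 then (t, a.2.1, a.2.2 + d)
          else (t, a.2.1, a.2.2)) (0, 0, 0)
      -- tckn[10] / tckn[9] in range by the length-11 guard
      (pyDigitInt (PySem.List.pyGetD s.toList 10 ' ') == PySem.Int.mod acc.1 10) &&
      (pyDigitInt (PySem.List.pyGetD s.toList 9 ' ') == PySem.Int.mod (acc.2.1 * 7 - acc.2.2) 10)

-- ===== PRECONDITION & SPEC =====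
def Spec_validate_tckn (tckn : Option String) (out : Bool) : Prop := out = validate_tckn_alt tckn
instance (tckn : Option String) (out : Bool) : Decidable (Spec_validate_tckn tckn out) := by unfold Spec_validate_tckn; infer_instance

-- ===== CLAIM (what is proved, stated in full; the proofs are below) =====
def Claim_equal_validate_tckn : Prop := ∀ (tckn : Option String), Dom_validate_tckn tckn → Spec_validate_tckn tckn (validate_tckn tckn)

-- ===== LEMMAS AND PROOFS =====

theorem list_len11 {α : Type} (l : List α) (h : l.length = 11) :
    ∃ c0 c1 c2 c3 c4 c5 c6 c7 c8 c9 c10, l = [c0,c1,c2,c3,c4,c5,c6,c7,c8,c9,c10] := by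
  obtain ⟨c0, l, rfl⟩ := l.exists_of_length_succ h; simp only [List.length_cons] at h
  obtain ⟨c1, l, rfl⟩ := l.exists_of_length_succ (by omega : l.length = 9 + 1); simp only [List.length_cons] at h
  obtain ⟨c2, l, rfl⟩ := l.exists_of_length_succ (by omega : l.length = 8 + 1); simp only [List.length_cons] at h
  obtain ⟨c3, l, rfl⟩ := l.exists_of_length_succ (by omega : l.length = 7 + 1); simp only [List.length_cons] at h
  obtain ⟨c4, l, rfl⟩ := l.exists_of_length_succ (by omega : l.length = 6 + 1); simp only [List.length_cons] at h
  obtain ⟨c5, l, rfl⟩ := l.exists_of_length_succ (by omega : l.length = 5 + 1); simp only [List.length_cons] at h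
  obtain ⟨c6, l, rfl⟩ := l.exists_of_length_succ (by omega : l.length = 4 + 1); simp only [List.length_cons] at h
  obtain ⟨c7, l, rfl⟩ := l.exists_of_length_succ (by omega : l.length = 3 + 1); simp only [List.length_cons] at h
  obtain ⟨c8, l, rfl⟩ := l.exists_of_length_succ (by omega : l.length = 2 + 1); simp only [List.length_cons] at h
  obtain ⟨c9, l, rfl⟩ := l.exists_of_length_succ (by omega : l.length = 1 + 1); simp only [List.length_cons] at h
  obtain ⟨c10, l, rfl⟩ := l.exists_of_length_succ (by omega : l.length = 0 + 1); simp only [List.length_cons] at h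
  have hl : l = [] := List.eq_nil_of_length_eq_zero (by omega)
  exact ⟨c0,c1,c2,c3,c4,c5,c6,c7,c8,c9,c10, by rw [hl]⟩

theorem validate_tckn_eq_of_len11 (c0 c1 c2 c3 c4 c5 c6 c7 c8 c9 c10 : Char) (s : String)
    (hs : s.toList = [c0,c1,c2,c3,c4,c5,c6,c7,c8,c9,c10]) :
    validate_tckn (some s) = validate_tckn_alt (some s) := by
  simp only [validate_tckn, validate_tckn_alt, hs]
  simp [PySem.List.pyGetD, PySem.List.slice, PySem.List.slice?,
    PySem.List.sliceIndices, PySem.List.clampIdx, PySem.Str.len_eq, pyDigitInt,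
    PySem.List.enumerate, List.range_succ]
  rw [Bool.eq_iff_iff]
  simp only [Bool.and_eq_true, decide_eq_true_eq, beq_iff_eq]
  constructor <;> rintro ⟨hg, hx, hy⟩ <;> exact ⟨hg, by omega, by omega⟩

-- ===== VERDICT (by name: the statement is the Claim_ definition above) =====
theorem validate_tckn_spec : Claim_equal_validate_tckn := by
  intro tckn _
  unfold Spec_validate_tckn
  match tckn with
  | none => rfl
  | some s =>
    by_cases hlen : s.toList.length = 11
    · obtain ⟨c0,c1,c2,c3,c4,c5,c6,c7,c8,c9,c10,hs⟩ := list_len11 s.toList hlen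
      exact validate_tckn_eq_of_len11 c0 c1 c2 c3 c4 c5 c6 c7 c8 c9 c10 s hs
    · simp only [validate_tckn, validate_tckn_alt, PySem.Str.len_eq]
      have h11 : ((s.length : Int) = 11) = False := by
        simp only [eq_iff_iff, iff_false]
        intro hc
        apply hlen
        have hlt : s.toList.length = s.length := by simp
        omega
      simp [h11]
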